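-- pv_equiv track=rewrite | github.com/sophiegiraudo/CITS1401-Project-2 | Project_2_22838134.py | unigrams_file
-- ===== SOURCE A (Python) =====
-- def unigrams_file(file):
--     """
--     Returns a list of all words in a file.
--     """
--
--     file_list = []
--     words = []
--     punctuation = "!@#$%^&*()_=+`~[]{}|\"';:<,>.?/\\"
--
--     file = file.replace("--", " ").replace("\n", " ")
--
--     for mark in punctuation:
--         file = file.replace(mark, "")
--
--     file_list.append(file.split(" "))
--
--     for word in file_list[0]:
--         if word:
--             words.append(word.lower())
--
--     return words
-- ===== SOURCE B (Python) =====
-- def unigrams_file(file):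
--     """
--     Returns a list of all words in a file (single-pass tokenizer).
--     """
--     text = file.replace("--", " ").replace("\n", " ")
--     punctuation = set("!@#$%^&*()_=+`~[]{}|\"';:<,>.?/\\")
--     words = []
--     buf = []
--     for ch in text:
--         if ch == " ":
--             if buf:
--                 words.append("".join(buf).lower())
--             buf = []
--         elif ch not in punctuation:
--             buf.append(ch)
--     if buf:
--         words.append("".join(buf).lower())
--     return words
-- ===== Notes on version B (the rewrite author's own statement) =====
-- stated objective: alternative
-- what changed: Replaces A's 30 whole-string replace passes (one per punctuation mark) followed by a split pass with a single character-by-character tokenizer that keeps a current-word buffer, skips punctuation, and flushes the buffer at space characters.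
import Mathlib
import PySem

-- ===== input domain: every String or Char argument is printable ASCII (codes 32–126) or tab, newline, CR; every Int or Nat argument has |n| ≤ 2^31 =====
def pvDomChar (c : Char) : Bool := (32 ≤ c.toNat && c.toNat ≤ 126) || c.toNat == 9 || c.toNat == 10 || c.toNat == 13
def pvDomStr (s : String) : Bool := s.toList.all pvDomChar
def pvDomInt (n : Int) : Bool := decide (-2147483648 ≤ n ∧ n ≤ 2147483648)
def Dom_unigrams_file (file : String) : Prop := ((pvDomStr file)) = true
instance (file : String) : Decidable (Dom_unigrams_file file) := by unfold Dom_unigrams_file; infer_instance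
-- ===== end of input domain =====

-- B replaces A's 30 whole-string punctuation-removal passes + split(" ") with one
-- character-by-character tokenizer pass (objective: alternative decomposition).

-- ===== PORT A =====
def unigrams_file (file : String) : List String :=
  let punctuation : String := "!@#$%^&*()_=+`~[]{}|\"';:<,>.?/\\"
  let file := PySem.Str.replace (PySem.Str.replace file "--" " ") "\n" " "
  -- for mark in punctuation: file = file.replace(mark, "")
  let file := punctuation.toList.foldl (fun f mark => PySem.Str.replace f (String.ofList [mark]) "") file
  -- file.split(" "): sep is the literal nonempty " ", so split? is always `some`
  let file_list : List (List String) := [(PySem.Str.split? file " ").getD []]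
  (file_list.headD []).foldl (fun words word => if word ≠ "" then words ++ [PySem.Str.lower word] else words) []

-- ===== PORT B =====
def unigrams_file_alt (file : String) : List String :=
  let text := PySem.Str.replace (PySem.Str.replace file "--" " ") "\n" " "
  let punctuation : List Char := "!@#$%^&*()_=+`~[]{}|\"';:<,>.?/\\".toList
  let st := text.toList.foldl (fun (st : List String × List Char) ch =>
      if ch = ' ' then
        (if st.2 ≠ [] then st.1 ++ [PySem.Str.lower (String.ofList st.2)] else st.1, [])
      else if ch ∈ punctuation then st
      else (st.1, st.2 ++ [ch])) ([], [])
  if st.2 ≠ [] then st.1 ++ [PySem.Str.lower (String.ofList st.2)] else st.1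

-- ===== PRECONDITION & SPEC =====
def Spec_unigrams_file (file : String) (out : List String) : Prop := out = unigrams_file_alt file
instance (file : String) (out : List String) : Decidable (Spec_unigrams_file file out) := by unfold Spec_unigrams_file; infer_instance

-- ===== CLAIM (what is proved, stated in full; the proofs are below) =====
def Claim_equal_unigrams_file : Prop := ∀ (file : String), Dom_unigrams_file file → Spec_unigrams_file file (unigrams_file file)


-- ===== LEMMAS AND PROOFS =====

/-- The punctuation marks, as a list of characters. -/
def pvPunct : List Char := "!@#$%^&*()_=+`~[]{}|\"';:<,>.?/\\".toList

/-- B's per-character step. -/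
def pvStep (st : List String × List Char) (ch : Char) : List String × List Char :=
  if ch = ' ' then
    (if st.2 ≠ [] then st.1 ++ [PySem.Str.lower (String.ofList st.2)] else st.1, [])
  else if ch ∈ pvPunct then st
  else (st.1, st.2 ++ [ch])

/-- A's per-word step. -/
def pvAdd (ws : List String) (w : List Char) : List String :=
  if w ≠ [] then ws ++ [PySem.Str.lower (String.ofList w)] else ws

/-- Flush of B's final state. -/
def pvFlush (st : List String × List Char) : List String :=
  if st.2 ≠ [] then st.1 ++ [PySem.Str.lower (String.ofList st.2)] else st.1

/-- Prefix the first chunk (used to characterise split on ' '). -/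
def pvConsHead (p : List Char) : List (List Char) → List (List Char)
  | [] => [p]
  | h :: r => (p ++ h) :: r

/-- Reference splitter on the single character ' '. -/
def pvSplit : List Char → List (List Char)
  | [] => [[]]
  | c :: t => if c = ' ' then [] :: pvSplit t else pvConsHead [c] (pvSplit t)

theorem pvSplit_ne_nil (l : List Char) : pvSplit l ≠ [] := by
  cases l with
  | nil => simp [pvSplit]
  | cons c t => simp only [pvSplit]; split <;> [simp; exact (by unfold pvConsHead; split <;> simp)]

theorem pvConsHead_consHead (a b : List Char) (l : List (List Char)) :
    pvConsHead a (pvConsHead b l) = pvConsHead (a ++ b) l := by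
  cases l <;> simp [pvConsHead]

theorem pvConsHead_nil (l : List (List Char)) (h : l ≠ []) : pvConsHead [] l = l := by
  cases l with
  | nil => exact absurd rfl h
  | cons x r => simp [pvConsHead]

/-- Single-character replace with "" is a filter. -/
theorem replace_go_filter (c : Char) : ∀ (fuel : Nat) (l acc : List Char), l.length ≤ fuel →
    PySem.Chars.replace.go [c] [] fuel l acc = acc.reverse ++ l.filter (· ≠ c) := by
  intro fuel
  induction fuel with
  | zero =>
    intro l acc h
    have : l = [] := List.eq_nil_of_length_eq_zero (Nat.le_zero.mp h)
    subst this; simp [PySem.Chars.replace.go]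
  | succ n ih =>
    intro l acc h
    cases l with
    | nil => simp [PySem.Chars.replace.go]
    | cons d t =>
      simp only [PySem.Chars.replace.go]
      by_cases hd : d = c
      · subst hd
        simp only [List.isPrefixOf, BEq.rfl, Bool.true_and, if_true]
        simp only [List.length_cons, List.length_nil, List.drop_succ_cons, List.drop_zero,
          List.reverse_nil, List.nil_append]
        rw [ih t acc (by simpa using Nat.le_of_succ_le_succ h)]
        simp [List.filter]
      · rw [show List.isPrefixOf [c] (d :: t) = false by
          simp [List.isPrefixOf]; exact fun hcd => absurd hcd.symm hd]
        simp only [Bool.false_eq_true, if_false]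
        rw [ih t (d :: acc) (by simpa using Nat.le_of_succ_le_succ h)]
        simp [List.filter, hd]

theorem replace_single (c : Char) (s : List Char) :
    PySem.Chars.replace s [c] [] = s.filter (· ≠ c) := by
  rw [PySem.Chars.replace]
  simp only [List.isEmpty_cons, Bool.false_eq_true, if_false]
  exact replace_go_filter c s.length s [] (le_refl _)

/-- The whole punctuation loop, at string level, is one filter. -/
theorem punct_fold_filter : ∀ (ps : List Char) (s : String),
    (ps.foldl (fun f mark => PySem.Str.replace f (String.ofList [mark]) "") s).toList
      = s.toList.filter (fun c => !ps.contains c) := by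
  intro ps
  induction ps with
  | nil => intro s; simp
  | cons p rest ih =>
    intro s
    rw [List.foldl_cons, ih]
    have h1 : (PySem.Str.replace s (String.ofList [p]) "").toList
        = s.toList.filter (· ≠ p) := by
      simp [PySem.Str.replace, replace_single]
    rw [h1, List.filter_filter]
    apply List.filter_congr
    intro c _
    by_cases hc : c = p <;> simp [hc]

theorem splitOn_go_spec : ∀ (fuel : Nat) (l cur : List Char) (acc : List (List Char)),
    l.length < fuel →
    PySem.Chars.splitOn.go [' '] fuel l cur acc
      = acc.reverse ++ pvConsHead cur.reverse (pvSplit l) := by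
  intro fuel
  induction fuel with
  | zero => intro l cur acc h; omega
  | succ n ih =>
    intro l cur acc h
    cases l with
    | nil => simp [PySem.Chars.splitOn.go, pvSplit, pvConsHead]
    | cons c t =>
      simp only [PySem.Chars.splitOn.go]
      by_cases hc : c = ' '
      · subst hc
        have hrec := ih t [] (cur.reverse :: acc) (by simpa using Nat.lt_of_succ_lt_succ h)
        simp only [List.reverse_nil] at hrec
        simp only [List.isPrefixOf, BEq.rfl, Bool.true_and, if_true,
          List.length_cons, List.length_nil, List.drop_succ_cons, List.drop_zero]
        rw [hrec, pvConsHead_nil _ (pvSplit_ne_nil t)]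
        simp [pvSplit, pvConsHead]
      · rw [show List.isPrefixOf [' '] (c :: t) = false by
          simp [List.isPrefixOf]; exact fun hcd => absurd hcd.symm hc]
        simp only [Bool.false_eq_true, if_false]
        rw [ih t (c :: cur) acc (by simpa using Nat.lt_of_succ_lt_succ h)]
        simp only [pvSplit, hc, if_false, List.reverse_cons]
        rw [pvConsHead_consHead]

theorem splitOn_space (l : List Char) : PySem.Chars.splitOn l [' '] = pvSplit l := by
  rw [PySem.Chars.splitOn, splitOn_go_spec (l.length + 1) l [] [] (Nat.lt_succ_self _)]
  simp [pvConsHead_nil _ (pvSplit_ne_nil l)]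

theorem space_not_punct : ' ' ∉ pvPunct := by decide

/-- Punctuation characters are no-ops for B's fold. -/
theorem step_skip_punct : ∀ (t : List Char) (st : List String × List Char),
    t.foldl pvStep st = (t.filter (fun c => !pvPunct.contains c)).foldl pvStep st := by
  intro t
  induction t with
  | nil => intro st; rfl
  | cons c r ih =>
    intro st
    by_cases hc : c ∈ pvPunct
    · have hsp : ¬ c = ' ' := fun h => space_not_punct (h ▸ hc)
      have : pvStep st c = st := by simp [pvStep, hsp, hc]
      simp only [List.foldl_cons, List.filter_cons, this]
      rw [show (!pvPunct.contains c) = false by simp [hc]]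
      exact ih st
    · simp only [List.foldl_cons, List.filter_cons]
      rw [show (!pvPunct.contains c) = true by simp [hc]]
      exact ih (pvStep st c)

/-- Main invariant: tokenizer fold = split-then-add, for punctuation-free input. -/
theorem tokenize_eq_split : ∀ (t : List Char), (∀ c ∈ t, c ∉ pvPunct) →
    ∀ (ws : List String) (buf : List Char),
    pvFlush (t.foldl pvStep (ws, buf)) = (pvConsHead buf (pvSplit t)).foldl pvAdd ws := by
  intro t
  induction t with
  | nil =>
    intro _ ws buf
    simp [pvFlush, pvSplit, pvConsHead, pvAdd]
  | cons c r ih =>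
    intro hnp ws buf
    have hr : ∀ c ∈ r, c ∉ pvPunct := fun x hx => hnp x (List.mem_cons_of_mem _ hx)
    by_cases hc : c = ' '
    · subst hc
      have hstep : pvStep (ws, buf) ' ' = (pvAdd ws buf, []) := by
        simp [pvStep, pvAdd]
      simp only [List.foldl_cons, hstep]
      rw [ih hr (pvAdd ws buf) []]
      rw [pvConsHead_nil _ (pvSplit_ne_nil r)]
      simp only [pvSplit, if_true]
      rw [show pvConsHead buf ([] :: pvSplit r) = buf :: pvSplit r by simp [pvConsHead]]
      rfl
    · have hcp : c ∉ pvPunct := hnp c (List.mem_cons_self)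
      have hstep : pvStep (ws, buf) c = (ws, buf ++ [c]) := by
        simp [pvStep, hc, hcp]
      simp only [List.foldl_cons, hstep]
      rw [ih hr ws (buf ++ [c])]
      simp only [pvSplit, hc, if_false]
      rw [pvConsHead_consHead]

/-- A's word-adding fold over the mapped string chunks. -/
theorem foldl_map_add : ∀ (chunks : List (List Char)) (ws : List String),
    (chunks.map String.ofList).foldl
      (fun words word => if word ≠ "" then words ++ [PySem.Str.lower word] else words) ws
    = chunks.foldl pvAdd ws := by
  intro chunks
  induction chunks with
  | nil => intro ws; rfl
  | cons h r ihc =>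
    intro ws
    simp only [List.map_cons, List.foldl_cons]
    rw [ihc]
    congr 1
    simp only [pvAdd]
    by_cases hh : h = []
    · subst hh; simp
    · rw [if_pos (by simpa using hh), if_pos hh]

/-- A's pipeline after the two initial replaces. -/
theorem A_eq (text : String) :
    ((PySem.Str.split? (pvPunct.foldl
        (fun f mark => PySem.Str.replace f (String.ofList [mark]) "") text) " ").getD []).foldl
      (fun words word => if word ≠ "" then words ++ [PySem.Str.lower word] else words) []
    = (pvSplit (text.toList.filter (fun c => !pvPunct.contains c))).foldl pvAdd [] := by
  rw [PySem.Str.split?, punct_fold_filter]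
  rw [show (" " : String).toList = [' '] from rfl]
  simp only [PySem.Chars.split?, List.isEmpty_cons, Bool.false_eq_true, if_false,
    Option.map_some, Option.getD_some]
  rw [splitOn_space, foldl_map_add]

/-- B's pipeline after the two initial replaces. -/
theorem B_eq (t : List Char) :
    (if (t.foldl pvStep (([] : List String), ([] : List Char))).2 ≠ [] then
        (t.foldl pvStep ([], [])).1
          ++ [PySem.Str.lower (String.ofList (t.foldl pvStep ([], [])).2)]
      else (t.foldl pvStep ([], [])).1)
    = (pvSplit (t.filter (fun c => !pvPunct.contains c))).foldl pvAdd [] := by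
  show pvFlush (t.foldl pvStep ([], [])) = _
  rw [step_skip_punct]
  rw [tokenize_eq_split _ (by
    intro c hc
    rw [List.mem_filter] at hc
    simpa using hc.2) [] []]
  rw [pvConsHead_nil _ (pvSplit_ne_nil _)]

-- ===== VERDICT (by name: the statement is the Claim_ definition above) =====
set_option maxRecDepth 4096 in
theorem unigrams_file_spec : Claim_equal_unigrams_file := by
  intro file _
  show unigrams_file file = unigrams_file_alt file
  unfold unigrams_file unigrams_file_alt
  simp only [List.headD_cons]
  exact (A_eq _).trans (B_eq _).symm
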